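-- pv_equiv track=rewrite | github.com/anudeepreddy332/bosch-production-line-performance-prediction | notebooks/14_create_path_features.py | extract_station_names
-- ===== SOURCE A (Python) =====
-- def extract_station_names(columns: list) -> dict:
--     """
--     Parse all column names to find unique station names and their columns
--     Input columns: ['L0_S0_F0', 'L0_S0_F2', 'L0_S1_F4', ...]
--     Output: {'L0_S0': ['L0_S0_F0', 'L0_S0_F2'], 'L0_S1': ['L0_S1_F4'], ...}
--     """
--     station_cols = {}
--     for col in columns:
--         if col in ['Id', 'Response']:
--             continue
--         parts = col.split('_')
--         if len(parts) >= 3: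
--             # 'L0_S0_F0' → station = 'L0_S0'
--             station = f"{parts[0]}_{parts[1]}"
--             station_cols.setdefault(station, []).append(col)
--     return station_cols
-- ===== SOURCE B (Python) =====
-- def _station(col):
--     if col in ('Id', 'Response'):
--         return None
--     parts = col.split('_')
--     if len(parts) < 3:
--         return None
--     return f"{parts[0]}_{parts[1]}"
--
--
-- def extract_station_names(columns: list) -> dict:
--     stations = list(dict.fromkeys(s for s in map(_station, columns) if s is not None))
--     return {s: [c for c in columns if _station(c) == s] for s in stations}
-- ===== Notes on version B (the rewrite author's own statement) =====
-- stated objective: alternative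
-- what changed: Replaces the one-pass setdefault-accumulation into a mutable dict by a two-phase shape: first an ordered dedup of the station keys (dict.fromkeys), then a dict comprehension that collects each station's columns with a filtering pass over the input.
import Mathlib
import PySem

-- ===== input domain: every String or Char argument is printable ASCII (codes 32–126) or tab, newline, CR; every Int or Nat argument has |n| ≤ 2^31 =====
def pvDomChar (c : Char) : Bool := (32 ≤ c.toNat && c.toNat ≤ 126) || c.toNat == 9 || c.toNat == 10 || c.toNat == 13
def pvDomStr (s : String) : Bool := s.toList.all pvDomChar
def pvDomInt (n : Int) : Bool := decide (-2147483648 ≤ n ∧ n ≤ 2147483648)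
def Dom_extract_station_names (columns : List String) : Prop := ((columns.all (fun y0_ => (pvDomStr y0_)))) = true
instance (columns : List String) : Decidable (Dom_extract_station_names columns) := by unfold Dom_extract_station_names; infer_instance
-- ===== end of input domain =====

-- B replaces A's one-pass setdefault accumulation by an ordered dedup of station keys followed by one filtering pass per station (objective: alternative decomposition).

-- ===== PORT A =====
def extract_station_names (columns : List String) : List (String × List String) :=
  (columns.foldl (fun d col =>
      if col = "Id" ∨ col = "Response" then d
      else
        let parts := (PySem.Str.split? col "_").getD []  -- exact: sep "_" ≠ "", so split? is some
        if 3 ≤ parts.length then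
          d.modify (parts.getD 0 "" ++ "_" ++ parts.getD 1 "") [] (fun v => v ++ [col])
        else d)
    PySem.Dict.empty).items

-- ===== PORT B =====
-- B-side helper: the Python _station
def pvStation (col : String) : Option String :=
  if col = "Id" ∨ col = "Response" then none
  else
    let parts := (PySem.Str.split? col "_").getD []  -- exact: sep "_" ≠ "", so split? is some
    if parts.length < 3 then none
    else some (parts.getD 0 "" ++ "_" ++ parts.getD 1 "")

def extract_station_names_alt (columns : List String) : List (String × List String) :=
  let stations := PySem.List.dedup (columns.filterMap pvStation)
  (stations.foldl
      (fun d s => d.insert s (columns.filter (fun c => pvStation c == some s)))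
      PySem.Dict.empty).items

-- ===== PRECONDITION & SPEC =====
def Spec_extract_station_names (columns : List String) (out : List (String × List String)) : Prop := out = extract_station_names_alt columns
instance (columns : List String) (out : List (String × List String)) : Decidable (Spec_extract_station_names columns out) := by unfold Spec_extract_station_names; infer_instance

-- ===== CLAIM (what is proved, stated in full; the proofs are below) =====
def Claim_equal_extract_station_names : Prop := ∀ (columns : List String), Dom_extract_station_names columns → Spec_extract_station_names columns (extract_station_names columns)

-- ===== LEMMAS AND PROOFS =====

-- A's loop keyed pairs: the (station, col) pairs A actually inserts, in order
def pvPairs (columns : List String) : List (String × String) :=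
  columns.filterMap (fun c => (pvStation c).map (fun s => (s, c)))

theorem pvStepA (d : PySem.Dict String (List String)) (c : String) :
    (if c = "Id" ∨ c = "Response" then d
     else
       let parts := (PySem.Str.split? c "_").getD []
       if 3 ≤ parts.length then
         d.modify (parts.getD 0 "" ++ "_" ++ parts.getD 1 "") [] (fun v => v ++ [c])
       else d)
    = (match pvStation c with
       | none => d
       | some s => d.modify s [] (fun v => v ++ [c])) := by
  unfold pvStation
  by_cases h1 : c = "Id" ∨ c = "Response"
  · simp [h1]
  · by_cases h2 : ((PySem.Str.split? c "_").getD []).length < 3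
    · simp [h1, h2, show ¬ 3 ≤ ((PySem.Str.split? c "_").getD []).length by omega]
    · simp [h1, h2, show 3 ≤ ((PySem.Str.split? c "_").getD []).length by omega]

theorem pvFoldA_eq (columns : List String) (d : PySem.Dict String (List String)) :
    columns.foldl (fun d col =>
      if col = "Id" ∨ col = "Response" then d
      else
        let parts := (PySem.Str.split? col "_").getD []
        if 3 ≤ parts.length then
          d.modify (parts.getD 0 "" ++ "_" ++ parts.getD 1 "") [] (fun v => v ++ [col])
        else d) d
    = (pvPairs columns).foldl (fun d p => d.modify p.1 [] (fun v => v ++ [p.2])) d := by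
  induction columns generalizing d with
  | nil => rfl
  | cons c cs ih =>
    cases h : pvStation c with
    | none =>
      have hp : pvPairs (c :: cs) = pvPairs cs := by
        simp [pvPairs, h]
      rw [List.foldl_cons, pvStepA, h, hp]
      exact ih d
    | some s =>
      have hp : pvPairs (c :: cs) = (s, c) :: pvPairs cs := by
        simp [pvPairs, h]
      rw [List.foldl_cons, pvStepA, h, hp, List.foldl_cons]
      exact ih _

theorem pvPairs_map_fst (columns : List String) :
    (pvPairs columns).map Prod.fst = columns.filterMap pvStation := by
  induction columns with
  | nil => rfl
  | cons c cs ih =>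
    simp only [pvPairs, List.filterMap_cons] at *
    cases h : pvStation c <;> simp [ih]

theorem pvPairs_filter (columns : List String) (k : String) :
    ((pvPairs columns).filter (fun p => p.1 == k)).map Prod.snd
      = columns.filter (fun c => pvStation c == some k) := by
  induction columns with
  | nil => rfl
  | cons c cs ih =>
    simp only [pvPairs, List.filterMap_cons, List.filter_cons] at *
    cases h : pvStation c with
    | none => simp [ih]
    | some s =>
      by_cases hs : s = k
      · simp [hs, ih]
      · simp [hs, ih]

theorem extract_station_names_spec_aux (columns : List String) :
    extract_station_names columns = extract_station_names_alt columns := by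
  unfold extract_station_names extract_station_names_alt
  rw [pvFoldA_eq]
  set dA := (pvPairs columns).foldl (fun d p => d.modify p.1 [] (fun v => v ++ [p.2]))
      PySem.Dict.empty with hdA
  -- keys of A's dict: ordered dedup of the stations
  have hkeys : dA.keys = PySem.List.dedup (columns.filterMap pvStation) := by
    rw [hdA, PySem.Dict.keys_foldl_modify_key (key := Prod.fst)]
    simp [PySem.Dict.keys_empty, PySem.Set.update, PySem.Set.ofList_eq_foldl,
      pvPairs_map_fst, PySem.List.dedup_eq_ofList]
  have hnd : dA.keys.Nodup := by
    rw [hkeys]; exact PySem.List.nodup_dedup _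
  -- values of A's dict at each key
  have hval : ∀ k, dA.getD k [] = columns.filter (fun c => pvStation c == some k) := by
    intro k
    rw [hdA, PySem.Dict.getD_foldl_modify_append, PySem.Dict.getD_empty]
    simp [pvPairs_filter columns k]
  -- B's fold over fresh distinct keys appends the pairs
  have hfresh : ∀ s ∈ PySem.List.dedup (columns.filterMap pvStation),
      (PySem.Dict.empty : PySem.Dict String (List String)).contains s = false := by
    intro s _; exact PySem.Dict.contains_empty s
  have hndk : ((PySem.List.dedup (columns.filterMap pvStation)).map id).Nodup := by
    simp
  have hB := PySem.Dict.items_foldl_insert_fresh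
      (l := PySem.List.dedup (columns.filterMap pvStation))
      (k := id)
      (v := fun s => columns.filter (fun c => pvStation c == some s))
      (d := PySem.Dict.empty) hfresh hndk
  simp only [id] at hB
  rw [hB, show (PySem.Dict.empty : PySem.Dict String (List String)).items = [] from rfl]
  rw [PySem.Dict.items_eq_map_keys dA hnd []]
  rw [hkeys]
  simp only [List.nil_append]
  exact List.map_congr_left (fun s _ => by rw [hval s])

-- ===== VERDICT (by name: the statement is the Claim_ definition above) =====
theorem extract_station_names_spec : Claim_equal_extract_station_names := by
  intro columns _
  exact extract_station_names_spec_aux columns
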